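-- pv_equiv track=rewrite | github.com/Chenxy517/EC602 | hw1/hw1_numbers.py | heavy
-- ===== SOURCE A (Python) =====
-- def heavy(y, N):
--     visited = []
--     while y not in visited:
--         visited.append(y)
--         y_nxt = 0
--         while y > 0:
--             digit = y % N
--             y = y // N
--             y_nxt += digit * digit
--         y = y_nxt
--         if y == 1:
--             return True
--     return False
-- ===== SOURCE B (Python) =====
-- def heavy(y, N):
--     def step(v):
--         digs = []
--         while v > 0:
--             digs.append(v % N)
--             v //= N
--         return sum(d * d for d in digs)
--     slow, fast = step(y), step(step(y))
--     while slow != fast: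
--         slow = step(slow)
--         fast = step(step(fast))
--     return slow == 1
-- ===== Notes on version B (the rewrite author's own statement) =====
-- stated objective: faster
-- what changed: Replaces A's growing visited-list (with its linear membership scan) by Floyd's tortoise-and-hare cycle detection over a step helper that collects the base-N digits into a list and sums their squares; no visited collection is kept.
-- outside the precondition, e.g. on heavy(2, -3): A returns True, B returns False
import Mathlib
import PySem

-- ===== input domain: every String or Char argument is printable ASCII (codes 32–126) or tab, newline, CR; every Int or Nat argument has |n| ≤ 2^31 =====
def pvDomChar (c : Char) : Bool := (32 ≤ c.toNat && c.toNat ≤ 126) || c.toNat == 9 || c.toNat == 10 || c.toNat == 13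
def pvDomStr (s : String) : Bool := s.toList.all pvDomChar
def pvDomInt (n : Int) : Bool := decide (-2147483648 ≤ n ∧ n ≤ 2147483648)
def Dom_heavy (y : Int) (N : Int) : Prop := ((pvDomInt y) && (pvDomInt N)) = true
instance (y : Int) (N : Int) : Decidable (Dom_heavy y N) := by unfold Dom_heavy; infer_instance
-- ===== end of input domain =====

-- B replaces A's growing visited-list (and its linear membership scan) by Floyd's
-- tortoise-and-hare cycle detection over a digit-list step helper.

-- ===== PORT A =====

lemma pvFloordivNeg {y N : Int} (hy : 0 < y) (hN : N < 0) : PySem.Int.floordiv y N < 0 := by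
  have hb := PySem.Int.mod_neg_bounds (a := y) hN
  have hfm := PySem.Int.floordiv_mul_add_mod y N
  by_contra hq
  have hq' : 0 ≤ PySem.Int.floordiv y N := not_lt.mp hq
  have h0 : PySem.Int.floordiv y N * N ≤ 0 :=
    mul_nonpos_of_nonneg_of_nonpos hq' (le_of_lt hN)
  linarith [hb.2]

-- the decreasing measure of A's digit loop, cited by heavyInner's decreasing_by

lemma pvInnerDec {y N : Int} (h : 0 < y ∧ (2 ≤ N ∨ N < 0)) :
    (PySem.Int.floordiv y N).toNat < y.toNat := by
  rcases h with ⟨hy, hN | hN⟩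
  · have hy2 : y * 2 ≤ y * N := mul_le_mul_of_nonneg_left hN (le_of_lt hy)
    have h1 : PySem.Int.floordiv y N < y :=
      (PySem.Int.floordiv_lt_iff_lt_mul (by omega)).mpr (by linarith)
    have h2 : 0 ≤ PySem.Int.floordiv y N :=
      (PySem.Int.le_floordiv_iff_mul_le (by omega)).mpr (by rw [zero_mul]; omega)
    omega
  · have := pvFloordivNeg hy hN
    omega

-- inner 'while y > 0' loop of A; the '(2 ≤ N ∨ N < 0)' conjunct of the guard only makes the
-- recursion total (Python raises on N = 0 and loops forever on N = 1 when y > 0 — outside Pre_).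

def heavyInner (y : Int) (N : Int) (acc : Int) : Int :=
  if h : 0 < y ∧ (2 ≤ N ∨ N < 0) then
    heavyInner (PySem.Int.floordiv y N) N (acc + PySem.Int.mod y N * PySem.Int.mod y N)
  else acc
termination_by y.toNat
decreasing_by exact pvInnerDec h

def heavyBound (y N : Int) : Int :=
  if heavyInner y N 0 ≤ 4 * (N * N) * ((N.natAbs : Int) + 1) then
    4 * (N * N) * ((N.natAbs : Int) + 1)
  else heavyInner y N 0


-- outer 'while y not in visited' loop of A; fuel only totalizes the recursion — it starts
-- above the orbit length (the visited list is duplicate-free inside a finite closed set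
-- of size at most heavyBound + 2, proved below), so the fuel-out branch is never reached on Pre_
def heavyLoop (N : Int) (fuel : Nat) (visited : List Int) (y : Int) : Bool :=
  match fuel with
  | 0 => false
  | fuel' + 1 =>
    if y ∈ visited then false
    else if heavyInner y N 0 = 1 then true
    else heavyLoop N fuel' (visited ++ [y]) (heavyInner y N 0)

def heavy (y : Int) (N : Int) : Bool :=
  heavyLoop N ((heavyBound y N).toNat + 3) [] y

-- ===== PORT B =====

-- facts cited by B's termination proof (stand-alone; B's scaffolding is independent of A's)
lemma altQuotNeg {v N : Int} (hv : 0 < v) (hN : N < 0) : PySem.Int.floordiv v N < 0 := by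
  by_contra hq
  have he := PySem.Int.floordiv_mul_add_mod v N
  have hm := PySem.Int.mod_neg_bounds (a := v) hN
  nlinarith [not_lt.mp hq, hm.2]

lemma altDigitsDec {v N : Int} (h : 0 < v ∧ (2 ≤ N ∨ N < 0)) :
    (PySem.Int.floordiv v N).toNat < v.toNat := by
  obtain ⟨hv, hN | hN⟩ := h
  · have hlt : PySem.Int.floordiv v N < v :=
      (PySem.Int.floordiv_lt_iff_lt_mul (by omega)).mpr (by nlinarith)
    have hge : 0 ≤ PySem.Int.floordiv v N :=
      (PySem.Int.le_floordiv_iff_mul_le (by omega)).mpr (by nlinarith)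
    omega
  · have := altQuotNeg hv hN
    omega

-- the 'while v > 0' loop of Source B's step helper, collecting the base-N digits into a list;
-- the '(2 ≤ N ∨ N < 0)' conjunct only totalizes (Python raises on N = 0 and loops on N = 1).

def altDigits (v : Int) (N : Int) : List Int :=
  if h : 0 < v ∧ (2 ≤ N ∨ N < 0) then
    PySem.Int.mod v N :: altDigits (PySem.Int.floordiv v N) N
  else []
termination_by v.toNat
decreasing_by exact altDigitsDec h

-- Source B's step: sum(d * d for d in digs)

def altStep (v : Int) (N : Int) : Int := ((altDigits v N).map (fun d => d * d)).sum

def altB (y N : Int) : Int :=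
  if altStep y N ≤ 3 * ((N.natAbs : Int) + 1) ^ 3 then 3 * ((N.natAbs : Int) + 1) ^ 3
  else altStep y N


-- Source B's 'while slow != fast' loop; fuel only totalizes the recursion — it starts above the
-- first tortoise-hare meeting index (at most altB + 2, proved below), so the fuel-out
-- branch is never reached on Pre_
def floydLoop (N : Int) (fuel : Nat) (slow fast : Int) : Bool :=
  match fuel with
  | 0 => slow == 1
  | fuel' + 1 =>
    if slow ≠ fast then floydLoop N fuel' (altStep slow N) (altStep (altStep fast N) N)
    else slow == 1

def heavy_alt (y : Int) (N : Int) : Bool :=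
  floydLoop N ((altB y N).toNat + 3) (altStep y N) (altStep (altStep y N) N)

-- ===== PRECONDITION & SPEC =====
-- Pre_ restricts to the natural domain of a base-N digit test: base N ≥ 2, or y ≤ 0 where no digit
-- expansion happens.  For y > 0 A raises ZeroDivisionError on N = 0, loops forever on N = 1, and on
-- negative bases returns accidental values of its digit loop that a happy-number test does not specify.
def Pre_heavy (y : Int) (N : Int) : Prop := 2 ≤ N ∨ y ≤ 0
instance (y : Int) (N : Int) : Decidable (Pre_heavy y N) := by unfold Pre_heavy; infer_instance
def pvWitness_heavy : Int × Int := (7, 10)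

def Spec_heavy (y : Int) (N : Int) (out : Bool) : Prop := out = heavy_alt y N
instance (y : Int) (N : Int) (out : Bool) : Decidable (Spec_heavy y N out) := by unfold Spec_heavy; infer_instance

-- ===== CLAIM (what is proved, stated in full; the proofs are below) =====
def Claim_equal_heavy : Prop := ∀ (y : Int) (N : Int), Dom_heavy y N → Pre_heavy y N → Spec_heavy y N (heavy y N)

-- ===== LEMMAS AND PROOFS =====

-- finite closed sets containing the two step orbits (used only by the proofs)
def heavyS (y N : Int) : List Int :=
  y :: PySem.List.pyRange 0 (heavyBound y N + 1) 1

def altSet (y N : Int) : Finset Int :=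
  insert y ((Finset.range (altB y N + 1).toNat).image (fun (i : Nat) => (i : Int)))


lemma heavyInner_of_not (v N acc : Int) (h : ¬ (0 < v ∧ (2 ≤ N ∨ N < 0))) :
    heavyInner v N acc = acc := by rw [heavyInner.eq_def, dif_neg h]

-- digit-square-sum bound: v < N^k gives heavyInner v N acc ≤ acc + k*(N-1)^2

lemma heavyInner_ge (v N acc : Int) : acc ≤ heavyInner v N acc :=
  heavyInner.induct N (fun v acc => acc ≤ heavyInner v N acc)
    (fun v acc h ih => by
      show acc ≤ heavyInner v N acc
      have ih' : acc + PySem.Int.mod v N * PySem.Int.mod v N ≤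
          heavyInner (PySem.Int.floordiv v N) N (acc + PySem.Int.mod v N * PySem.Int.mod v N) := ih
      rw [heavyInner.eq_def, dif_pos h]
      have hsq := mul_self_nonneg (PySem.Int.mod v N)
      linarith)
    (fun v acc h => by
      show acc ≤ heavyInner v N acc
      rw [heavyInner.eq_def, dif_neg h])
    v acc

lemma heavyInner_le_pow (N : Int) (hN : 2 ≤ N) :
    ∀ (k : Nat) (v acc : Int), 0 ≤ v → v < N ^ k →
      heavyInner v N acc ≤ acc + k * (N - 1) ^ 2 := by
  intro k
  induction k with
  | zero =>
      intro v acc h0 h1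
      have hpow0 : (N:Int) ^ 0 = 1 := pow_zero N
      have hv : v = 0 := by omega
      subst hv
      rw [heavyInner_of_not _ _ _ (by omega), Nat.cast_zero, zero_mul, add_zero]
  | succ k ih =>
      intro v acc h0 h1
      rw [Nat.cast_succ, add_mul, one_mul]
      by_cases hv : 0 < v
      · rw [heavyInner.eq_def, dif_pos ⟨hv, Or.inl hN⟩]
        have hm0 : 0 ≤ PySem.Int.mod v N := PySem.Int.mod_nonneg _ (by omega)
        have hm1 : PySem.Int.mod v N < N := PySem.Int.mod_lt _ (by omega)
        have hd0 : 0 ≤ PySem.Int.floordiv v N :=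
          (PySem.Int.le_floordiv_iff_mul_le (by omega)).mpr (by rw [zero_mul]; omega)
        have hd1 : PySem.Int.floordiv v N < N ^ k := by
          rw [PySem.Int.floordiv_lt_iff_lt_mul (by omega), ← pow_succ]
          exact h1
        have hsq : PySem.Int.mod v N * PySem.Int.mod v N ≤ (N - 1) ^ 2 := by
          rw [pow_two]
          exact mul_le_mul (by omega) (by omega) hm0 (by omega)
        calc heavyInner (PySem.Int.floordiv v N) N (acc + PySem.Int.mod v N * PySem.Int.mod v N)
            ≤ (acc + PySem.Int.mod v N * PySem.Int.mod v N) + (k:Int) * (N - 1) ^ 2 :=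
              ih _ _ hd0 hd1
          _ ≤ (acc + (N - 1) ^ 2) + (k:Int) * (N - 1) ^ 2 :=
              add_le_add_left (add_le_add_right hsq acc) ((k:Int) * (N - 1) ^ 2)
          _ = acc + ((k:Int) * (N - 1) ^ 2 + (N - 1) ^ 2) := by
              rw [add_assoc, add_comm ((N - 1) ^ 2) _]
      · rw [heavyInner_of_not _ _ _ (by omega)]
        have hnn : (0:Int) ≤ (k:Int) * (N - 1) ^ 2 + (N - 1) ^ 2 :=
          add_nonneg (mul_nonneg (Int.natCast_nonneg k) (sq_nonneg _)) (sq_nonneg _)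
        exact le_add_of_nonneg_right hnn

lemma pvPowGt (N : Int) (hN : 2 ≤ N) :
    ∀ k : Nat, 3 ≤ k → ((k : Int) + 1) * (N - 1) ^ 2 < N ^ k := by
  intro k
  induction k with
  | zero => omega
  | succ k ih =>
      intro hk
      rw [Nat.cast_succ]
      rcases Nat.lt_or_ge k 3 with h3 | h3
      · have hk3 : k = 2 := by omega
        subst hk3
        have e1 : (N - 2) ^ 2 * N + (4 * N - 4) = N ^ (2 + 1) - 4 * (N - 1) ^ 2 := by ring
        have e2 : 0 ≤ (N - 2) ^ 2 * N := mul_nonneg (sq_nonneg _) (by omega)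
        have e3 : ((2:Nat):Int) = 2 := by norm_num
        rw [e3]
        omega
      · have h1 := ih h3
        have hp : (0:Int) < N ^ k := pow_pos (by omega) k
        calc ((k:Int) + 1 + 1) * (N - 1) ^ 2
            ≤ (2 * ((k:Int) + 1)) * (N - 1) ^ 2 :=
              mul_le_mul_of_nonneg_right (by omega) (sq_nonneg _)
          _ = 2 * (((k:Int) + 1) * (N - 1) ^ 2) := mul_assoc 2 _ _
          _ < 2 * N ^ k := by omega
          _ = N ^ k * 2 := mul_comm 2 _
          _ ≤ N ^ k * N := mul_le_mul_of_nonneg_left hN (le_of_lt hp)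
          _ = N ^ (k + 1) := (pow_succ N k).symm

-- for v ≥ N^3 the digit-square sum strictly decreases

lemma heavyInner_lt_self (N v : Int) (hN : 2 ≤ N) (hv : N ^ 3 ≤ v) : heavyInner v N 0 < v := by
  have hv0 : 0 < v := lt_of_lt_of_le (by positivity) hv
  set vn := v.toNat with hvn
  set Nn := N.toNat with hNn
  have hNn1 : 1 < Nn := by omega
  have hcastN : (Nn : Int) = N := by omega
  have hcastv : (vn : Int) = v := by omega
  have hpow : ∀ j : Nat, ((Nn ^ j : Nat) : Int) = N ^ j := by
    intro j; push_cast [hcastN]; ring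
  set k := Nat.log Nn vn with hk
  have hk1 : vn < Nn ^ (k + 1) := Nat.lt_pow_succ_log_self hNn1 vn
  have hk2 : Nn ^ k ≤ vn := Nat.pow_log_le_self Nn (by omega)
  have hk3 : 3 ≤ k := by
    have h3 : Nn ^ 3 ≤ vn := by
      have : (N:Int) ^ 3 ≤ v := hv
      have := hpow 3
      omega
    exact (Nat.le_log_iff_pow_le hNn1 (by omega)).mpr h3
  have hlt : v < N ^ (k + 1) := by
    have := hpow (k + 1)
    omega
  have h1 := heavyInner_le_pow N hN (k + 1) v 0 (by omega) hlt
  have h2 := pvPowGt N hN (k + 1) (by omega)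
  have h3 : (N:Int) ^ k ≤ v := by
    have := hpow k
    omega
  have e : ((k + 1 : Nat) : Int) = (k : Int) + 1 := by push_cast; ring
  calc heavyInner v N 0 ≤ 0 + ((k + 1 : Nat) : Int) * (N - 1) ^ 2 := h1
    _ = ((k : Int) + 1) * (N - 1) ^ 2 := by rw [e]; ring
    _ < N ^ (k + 1 - 1) := by
        have := pvPowGt N hN k hk3
        simpa using this
    _ ≤ v := by simpa using h3

lemma pvBaseNonneg (N : Int) : (0:Int) ≤ 4 * (N * N) * ((N.natAbs : Int) + 1) :=
  mul_nonneg (mul_nonneg (by norm_num) (mul_self_nonneg N))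
    (by have := Int.natCast_nonneg N.natAbs; omega)

lemma le_heavyBound_inner (y N : Int) : heavyInner y N 0 ≤ heavyBound y N := by
  unfold heavyBound; split
  · assumption
  · exact le_rfl

lemma le_heavyBound_base (y N : Int) : 4 * (N * N) * ((N.natAbs : Int) + 1) ≤ heavyBound y N := by
  unfold heavyBound; split
  · exact le_rfl
  · linarith

lemma heavyBound_nonneg (y N : Int) : 0 ≤ heavyBound y N := by
  linarith [le_heavyBound_base y N, pvBaseNonneg N]

-- a finite (list-represented) set containing the whole orbit of A's outer loop

lemma mem_heavyS (y N v : Int) : v ∈ heavyS y N ↔ v = y ∨ (0 ≤ v ∧ v ≤ heavyBound y N) := by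
  simp only [heavyS, List.mem_cons, PySem.List.mem_pyRange_one]
  omega

lemma heavyS_closed (y N : Int) : ∀ v ∈ heavyS y N, heavyInner v N 0 ∈ heavyS y N := by
  intro v hv
  rw [mem_heavyS]
  have hnn : 0 ≤ heavyInner v N 0 := heavyInner_ge v N 0
  rcases (mem_heavyS y N v).mp hv with rfl | ⟨hv0, hv1⟩
  · right; exact ⟨hnn, le_heavyBound_inner v N⟩
  · by_cases hpos : 0 < v
    · rcases Int.lt_or_le N 0 with hNneg | hN0
      · -- negative base: one division step, then the quotient is negative
        right
        have hstep : heavyInner v N 0 = PySem.Int.mod v N * PySem.Int.mod v N := by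
          rw [heavyInner.eq_def, dif_pos ⟨hpos, Or.inr hNneg⟩,
            heavyInner_of_not _ _ _ (by have := pvFloordivNeg hpos hNneg; omega)]
          exact zero_add _
        refine ⟨hnn, ?_⟩
        rw [hstep]
        have hb := PySem.Int.mod_neg_bounds (a := v) hNneg
        have hsq : PySem.Int.mod v N * PySem.Int.mod v N ≤ N * N := by
          have h' : (-PySem.Int.mod v N) * (-PySem.Int.mod v N) ≤ (-N) * (-N) :=
            mul_le_mul (by omega) (by omega) (by omega) (by omega)
          rw [neg_mul_neg, neg_mul_neg] at h'
          exact h'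
        have h4 := le_heavyBound_base y N
        have h5 : N * N * 1 ≤ N * N * (4 * ((N.natAbs : Int) + 1)) :=
          mul_le_mul_of_nonneg_left (by have := Int.natCast_nonneg N.natAbs; omega)
            (mul_self_nonneg N)
        have h6 : N * N * (4 * ((N.natAbs : Int) + 1)) = 4 * (N * N) * ((N.natAbs : Int) + 1) :=
          (mul_left_comm (N * N) 4 _).trans (mul_assoc 4 (N * N) _).symm
        omega
      · rcases Int.lt_or_le N 2 with hN1 | hN2
        · -- N = 0 or N = 1: the totalizing guard fails, the step returns 0
          right
          rw [heavyInner_of_not _ _ _ (by omega)]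
          exact ⟨le_rfl, heavyBound_nonneg y N⟩
        · right
          refine ⟨hnn, ?_⟩
          rcases Int.lt_or_le v (N ^ 3) with hsmall | hbig
          · have h1 := heavyInner_le_pow N hN2 3 v 0 (by omega) hsmall
            have h2 : ((3:Nat):Int) * (N - 1) ^ 2 ≤ 4 * (N * N) * ((N.natAbs : Int) + 1) := by
              have habs : ((N.natAbs : Int)) = N := by omega
              rw [habs]
              have ha : (N - 1) ^ 2 ≤ N * N := by
                rw [pow_two]
                exact mul_le_mul (by omega) (by omega) (by omega) (by omega)
              have hb' : (N * N) * 3 ≤ (N * N) * (4 * (N + 1)) :=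
                mul_le_mul_of_nonneg_left (by omega) (mul_self_nonneg N)
              have hc : ((3:Nat):Int) = 3 := by norm_num
              have hd : (N * N) * (4 * (N + 1)) = 4 * (N * N) * (N + 1) :=
                (mul_left_comm (N * N) 4 _).trans (mul_assoc 4 (N * N) _).symm
              rw [hc]
              omega
            linarith [le_heavyBound_base y N]
          · have h1 := heavyInner_lt_self N v hN2 hbig
            omega
    · right
      rw [heavyInner_of_not _ _ _ (by omega)]
      exact ⟨le_rfl, heavyBound_nonneg y N⟩

lemma pvNodupSnoc {l : List Int} {y : Int} (h1 : l.Nodup) (hmem : y ∉ l) :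
    (l ++ [y]).Nodup := by
  simp [List.nodup_append, h1]
  intro a ha hay; subst hay; exact hmem ha

lemma pvMemSnoc {S l : List Int} {y : Int} (h2 : ∀ v ∈ l, v ∈ S) (h3 : y ∈ S) :
    ∀ v ∈ l ++ [y], v ∈ S := by
  intro v hv
  rcases List.mem_append.mp hv with h | h
  · exact h2 v h
  · simp at h; subst h; exact h3

lemma pvNodupLenLe (l S : List Int) (h1 : l.Nodup) (h2 : ∀ v ∈ l, v ∈ S) :
    l.length ≤ S.length := by
  rw [← List.toFinset_card_of_nodup h1]
  calc l.toFinset.card ≤ S.toFinset.card :=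
        Finset.card_le_card (fun x hx => List.mem_toFinset.mpr (h2 x (List.mem_toFinset.mp hx)))
    _ ≤ S.length := S.toFinset_card_le

-- the decreasing measure of A's outer loop, cited by heavyLoop's decreasing_by
lemma altDigits_eq_nil {v N : Int} (h : ¬ (0 < v ∧ (2 ≤ N ∨ N < 0))) : altDigits v N = [] := by
  rw [altDigits.eq_def, dif_neg h]

lemma altDigits_eq_cons {v N : Int} (h : 0 < v ∧ (2 ≤ N ∨ N < 0)) :
    altDigits v N = PySem.Int.mod v N :: altDigits (PySem.Int.floordiv v N) N := by
  rw [altDigits.eq_def, dif_pos h]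

lemma altStep_zero {v N : Int} (h : ¬ (0 < v ∧ (2 ≤ N ∨ N < 0))) : altStep v N = 0 := by
  unfold altStep
  rw [altDigits_eq_nil h]
  rfl

lemma altStep_nonneg (v N : Int) : 0 ≤ altStep v N := by
  refine List.sum_nonneg ?_
  intro x hx
  obtain ⟨d, _, rfl⟩ := List.mem_map.mp hx
  exact mul_self_nonneg d

-- for base N ≥ 2 every collected digit lies in [0, N)

lemma altDigits_mem_bound {N : Int} (hN : 2 ≤ N) :
    ∀ (n : Nat) (v : Int), v.toNat ≤ n → ∀ d ∈ altDigits v N, 0 ≤ d ∧ d < N := by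
  intro n
  induction n with
  | zero =>
      intro v hv d hd
      rw [altDigits_eq_nil (by omega)] at hd
      cases hd
  | succ n ih =>
      intro v hv d hd
      by_cases hg : 0 < v ∧ (2 ≤ N ∨ N < 0)
      · rw [altDigits_eq_cons hg] at hd
        rcases List.mem_cons.mp hd with rfl | hd'
        · exact ⟨PySem.Int.mod_nonneg _ (by omega), PySem.Int.mod_lt _ (by omega)⟩
        · exact ih _ (by have := altDigitsDec hg; omega) d hd'
      · rw [altDigits_eq_nil hg] at hd
        cases hd

-- v < N^k yields at most k digits

lemma altDigits_len_le {N : Int} (hN : 2 ≤ N) :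
    ∀ (k : Nat) (v : Int), 0 ≤ v → v < N ^ k → (altDigits v N).length ≤ k := by
  intro k
  induction k with
  | zero =>
      intro v h0 h1
      rw [pow_zero] at h1
      rw [altDigits_eq_nil (by omega)]
      exact le_rfl
  | succ k ih =>
      intro v h0 h1
      by_cases hv : 0 < v
      · rw [altDigits_eq_cons ⟨hv, Or.inl hN⟩, List.length_cons]
        have hd0 : 0 ≤ PySem.Int.floordiv v N :=
          (PySem.Int.le_floordiv_iff_mul_le (by omega)).mpr (by nlinarith)
        have hd1 : PySem.Int.floordiv v N < N ^ k := by
          rw [PySem.Int.floordiv_lt_iff_lt_mul (by omega), ← pow_succ]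
          exact h1
        exact Nat.succ_le_succ (ih _ hd0 hd1)
      · rw [altDigits_eq_nil (by omega)]
        exact Nat.zero_le _

-- hence: v < N^k gives altStep v N ≤ k * (N-1)^2

lemma altStep_le {N : Int} (hN : 2 ≤ N) (k : Nat) (v : Int) (h0 : 0 ≤ v) (h1 : v < N ^ k) :
    altStep v N ≤ (k : Int) * (N - 1) ^ 2 := by
  have hb : ∀ x ∈ (altDigits v N).map (fun d => d * d), x ≤ (N - 1) ^ 2 := by
    intro x hx
    obtain ⟨d, hd, rfl⟩ := List.mem_map.mp hx
    obtain ⟨hd0, hd1⟩ := altDigits_mem_bound hN v.toNat v le_rfl d hd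
    nlinarith
  have hsum := List.sum_le_card_nsmul _ _ hb
  have hlen : ((altDigits v N).map (fun d => d * d)).length ≤ k := by
    rw [List.length_map]
    exact altDigits_len_le hN k v h0 h1
  have hcast : (((altDigits v N).map (fun d => d * d)).length : Int) ≤ (k : Int) := by
    exact_mod_cast hlen
  calc altStep v N ≤ (((altDigits v N).map (fun d => d * d)).length : Int) • (N - 1) ^ 2 := hsum
    _ = (((altDigits v N).map (fun d => d * d)).length : Int) * (N - 1) ^ 2 := by
        rw [smul_eq_mul]
    _ ≤ (k : Int) * (N - 1) ^ 2 := mul_le_mul_of_nonneg_right hcast (sq_nonneg _)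

-- growth of N^k against the digit bound (B-side analogue, proved by nlinarith)

lemma altPowGt {N : Int} (hN : 2 ≤ N) : ∀ k : Nat, 3 ≤ k → ((k : Int) + 1) * (N - 1) ^ 2 < N ^ k := by
  intro k
  induction k with
  | zero => omega
  | succ k ih =>
      intro hk
      rcases Nat.lt_or_ge k 3 with h3 | h3
      · obtain rfl : k = 2 := by omega
        push_cast
        have h := mul_nonneg (by omega : (0:Int) ≤ N - 2) (sq_nonneg (N - 1))
        nlinarith
      · have h1 := ih h3
        have hp : (0:Int) < N ^ k := pow_pos (by omega) k
        have h2 : N ^ k * 2 ≤ N ^ k * N := by nlinarith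
        have e : (N:Int) ^ (k + 1) = N ^ k * N := pow_succ N k
        push_cast
        nlinarith [mul_nonneg (Int.natCast_nonneg k) (sq_nonneg (N - 1))]

-- above N^3 the step strictly shrinks its argument

lemma altStep_lt_self {N v : Int} (hN : 2 ≤ N) (hv : N ^ 3 ≤ v) : altStep v N < v := by
  have hv0 : 0 < v := lt_of_lt_of_le (by positivity) hv
  have hN1 : 1 < N.toNat := by omega
  have hcN : (N.toNat : Int) = N := by omega
  have hcv : (v.toNat : Int) = v := by omega
  have hpow : ∀ j : Nat, ((N.toNat ^ j : Nat) : Int) = N ^ j := by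
    intro j; push_cast [hcN]; ring
  set k := Nat.log N.toNat v.toNat with hkdef
  have hup : v.toNat < N.toNat ^ (k + 1) := Nat.lt_pow_succ_log_self hN1 _
  have hlo : N.toNat ^ k ≤ v.toNat := Nat.pow_log_le_self _ (by omega)
  have hk3 : 3 ≤ k := by
    refine (Nat.le_log_iff_pow_le hN1 (by omega)).mpr ?_
    have := hpow 3
    omega
  have hstep := altStep_le hN (k + 1) v (by omega) (by have := hpow (k + 1); omega)
  have hgrow := altPowGt hN k hk3
  have hvge : (N:Int) ^ k ≤ v := by have := hpow k; omega
  have e : ((k + 1 : Nat) : Int) = (k : Int) + 1 := by push_cast; ring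
  rw [e] at hstep
  linarith

-- B's orbit bound and closed set (Finset-based, independent of A's list set)

lemma le_altB_base (y N : Int) : 3 * ((N.natAbs : Int) + 1) ^ 3 ≤ altB y N := by
  unfold altB; split
  · exact le_rfl
  · linarith

lemma le_altB_step (y N : Int) : altStep y N ≤ altB y N := by
  unfold altB; split
  · assumption
  · exact le_rfl

lemma mem_altSet (y N v : Int) : v ∈ altSet y N ↔ v = y ∨ (0 ≤ v ∧ v ≤ altB y N) := by
  constructor
  · intro h
    rcases Finset.mem_insert.mp h with hvy | h'
    · exact Or.inl hvy
    · obtain ⟨i, hi, hiv⟩ := Finset.mem_image.mp h'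
      have := Finset.mem_range.mp hi
      right; omega
  · rintro (hvy | ⟨h0, h1⟩)
    · exact hvy ▸ Finset.mem_insert_self _ _
    · exact Finset.mem_insert_of_mem (Finset.mem_image.mpr
        ⟨v.toNat, Finset.mem_range.mpr (by omega), (by omega : ((v.toNat : Int)) = v)⟩)

lemma altB_nonneg (y N : Int) : 0 ≤ altB y N := by
  have h0 : (0:Int) ≤ 3 * ((N.natAbs : Int) + 1) ^ 3 := by positivity
  exact le_trans h0 (le_altB_base y N)

lemma altStep_le_altB (y N v : Int) (hv0 : 0 ≤ v) (hv1 : v ≤ altB y N) :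
    altStep v N ≤ altB y N := by
  by_cases hg : 0 < v ∧ (2 ≤ N ∨ N < 0)
  · rcases hg.2 with hN | hN
    · rcases Int.lt_or_le v (N ^ 3) with hs | hs
      · have h1 := altStep_le hN 3 v hv0 hs
        refine le_trans h1 (le_trans ?_ (le_altB_base y N))
        have habs : ((N.natAbs : Int)) = N := by omega
        rw [habs]
        have e1 : (N - 1) ^ 2 ≤ (N + 1) ^ 2 := by nlinarith
        have e2 : (N + 1) ^ 2 * 1 ≤ (N + 1) ^ 2 * (N + 1) :=
          mul_le_mul_of_nonneg_left (by omega) (sq_nonneg _)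
        have e3 : (N + 1) ^ 2 * (N + 1) = (N + 1) ^ 3 := (pow_succ _ 2).symm
        push_cast
        nlinarith
      · exact le_trans (le_of_lt (altStep_lt_self hN hs)) hv1
    · -- negative base: a single digit, then the quotient is negative
      have hq := altQuotNeg hg.1 hN
      have hmb := PySem.Int.mod_neg_bounds (a := v) hN
      have hone : altStep v N = PySem.Int.mod v N * PySem.Int.mod v N := by
        unfold altStep
        rw [altDigits_eq_cons hg, altDigits_eq_nil (by omega)]
        simp
      rw [hone]
      refine le_trans ?_ (le_altB_base y N)
      have hsq : PySem.Int.mod v N * PySem.Int.mod v N ≤ N * N := by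
        nlinarith [mul_neg_of_pos_of_neg
          (show (0:Int) < PySem.Int.mod v N - N by omega)
          (show PySem.Int.mod v N + N < 0 by omega)]
      have ha0 : (0:Int) ≤ (N.natAbs : Int) := Int.natCast_nonneg _
      have haN : ((N.natAbs : Int)) = -N := by omega
      nlinarith [mul_nonneg (mul_nonneg ha0 ha0) ha0]
  · rw [altStep_zero hg]
    exact altB_nonneg y N

lemma altSet_closed (y N : Int) : ∀ v ∈ altSet y N, altStep v N ∈ altSet y N := by
  intro v hv
  have key : altStep v N ≤ altB y N := by
    rcases (mem_altSet y N v).mp hv with hvy | ⟨h0, h1⟩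
    · rw [hvy]; exact le_altB_step y N
    · exact altStep_le_altB y N v h0 h1
  exact (mem_altSet y N _).mpr (Or.inr ⟨altStep_nonneg v N, key⟩)

-- the (ghost) orbit of Source B's step, used only by the termination arguments

def altIter (N y : Int) (k : Nat) : Int := (fun v => altStep v N)^[k] y

lemma altIter_succ (N y : Int) (k : Nat) : altIter N y (k + 1) = altStep (altIter N y k) N :=
  Function.iterate_succ_apply' _ _ _

lemma altIter_mem (y N : Int) : ∀ k, altIter N y k ∈ altSet y N := by
  intro k
  induction k with
  | zero => exact (mem_altSet y N y).mpr (Or.inl rfl)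
  | succ k ih =>
      rw [altIter_succ]
      exact altSet_closed y N _ ih

-- shifting past a repeated state: f^[i+p] x = f^[i] x propagates to all later indices

lemma altShift (f : Int → Int) (x : Int) (i p : Nat) (h : f^[i + p] x = f^[i] x) :
    ∀ (c s : Nat), f^[s + i + c * p] x = f^[s + i] x := by
  intro c
  induction c with
  | zero => intro s; rw [Nat.zero_mul, Nat.add_zero]
  | succ c ih =>
      intro s
      have e : s + i + (c + 1) * p = (s + c * p) + (i + p) := by
        have : (c + 1) * p = c * p + p := Nat.succ_mul c p
        omega
      rw [e, Function.iterate_add_apply, h, ← Function.iterate_add_apply]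
      have e2 : s + c * p + i = s + i + c * p := by ring
      rw [e2]; exact ih s

-- the tortoise and the hare meet: some m ≥ 1 has iter m = iter 2m (pigeonhole in altSet)
-- the tortoise and the hare meet, at an index at most the closed-set cardinality
lemma altMeet_bounded (y N : Int) :
    ∃ m : Nat, 0 < m ∧ m ≤ (altSet y N).card ∧ altIter N y m = altIter N y (2 * m) := by
  obtain ⟨a, ha, b, hb, hne, heqab⟩ :=
    Finset.exists_ne_map_eq_of_card_lt_of_maps_to
      (s := Finset.range ((altSet y N).card + 1)) (t := altSet y N)
      (by rw [Finset.card_range]; omega)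
      (fun a _ => altIter_mem y N a)
  have hmain : ∀ i j : Nat, i < j → j ≤ (altSet y N).card → altIter N y i = altIter N y j →
      ∃ m : Nat, 0 < m ∧ m ≤ (altSet y N).card ∧ altIter N y m = altIter N y (2 * m) := by
    intro i j hij hjc heq
    obtain ⟨p, hp⟩ : ∃ p, j = i + p := ⟨j - i, by omega⟩
    have hp0 : 0 < p := by omega
    have hshift := altShift (fun v => altStep v N) y i p
      (by show altIter N y (i + p) = altIter N y i
          rw [← hp, heq])
    set c := i / p + 1 with hc
    set m := p * c with hm
    have hdm := Nat.div_add_mod i p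
    have hmod := Nat.mod_lt i hp0
    have hm2 : m = p * (i / p) + p := by rw [hm, hc]; ring
    have hcp : c * p = m := by rw [hm]; exact Nat.mul_comm p c ▸ rfl
    have him : i < m := by omega
    have hmj : m ≤ j := by omega
    have h1 := hshift c (m - i)
    have e1 : m - i + i = m := by omega
    have e2 : m - i + i + c * p = 2 * m := by omega
    rw [e2, e1] at h1
    exact ⟨m, by omega, by omega, h1.symm⟩
  have hac : a ≤ (altSet y N).card := by have := Finset.mem_range.mp ha; omega
  have hbc : b ≤ (altSet y N).card := by have := Finset.mem_range.mp hb; omega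
  rcases lt_or_gt_of_ne hne with h | h
  · exact hmain a b h hbc heqab
  · exact hmain b a h hac heqab.symm

lemma altMeet_exists (y N : Int) : ∃ m : Nat, 0 < m ∧ altIter N y m = altIter N y (2 * m) := by
  obtain ⟨m, h1, _, h3⟩ := altMeet_bounded y N
  exact ⟨m, h1, h3⟩

def altMeetIdx (y N : Int) : Nat := Nat.find (altMeet_exists y N)

lemma altMeetIdx_le_card (y N : Int) : altMeetIdx y N ≤ (altSet y N).card := by
  obtain ⟨m, h1, h2, h3⟩ := altMeet_bounded y N
  exact le_trans (Nat.find_le ⟨h1, h3⟩) h2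

lemma heavyInner_acc : ∀ (n : Nat) (v : Int), v.toNat ≤ n → ∀ (N acc : Int),
    heavyInner v N acc = acc + heavyInner v N 0 := by
  intro n
  induction n with
  | zero =>
      intro v hv N acc
      rw [heavyInner_of_not _ _ _ (by omega), heavyInner_of_not _ _ _ (by omega)]
      ring
  | succ n ih =>
      intro v hv N acc
      by_cases h : 0 < v ∧ (2 ≤ N ∨ N < 0)
      · have hd := pvInnerDec h
        have h1 : heavyInner v N acc =
            (acc + PySem.Int.mod v N * PySem.Int.mod v N) +
              heavyInner (PySem.Int.floordiv v N) N 0 := by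
          rw [heavyInner.eq_def, dif_pos h]
          exact ih _ (by omega) _ _
        have h2 : heavyInner v N 0 =
            (0 + PySem.Int.mod v N * PySem.Int.mod v N) +
              heavyInner (PySem.Int.floordiv v N) N 0 := by
          rw [heavyInner.eq_def, dif_pos h]
          exact ih _ (by omega) _ _
        rw [h1, h2]
        ring
      · rw [heavyInner_of_not _ _ _ h, heavyInner_of_not _ _ _ h]
        ring

lemma altStep_eq_aux : ∀ (n : Nat) (v : Int), v.toNat ≤ n → ∀ (N : Int),
    altStep v N = heavyInner v N 0 := by
  intro n
  induction n with
  | zero =>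
      intro v hv N
      rw [altStep_zero (by omega), heavyInner_of_not _ _ _ (by omega)]
  | succ n ih =>
      intro v hv N
      by_cases h : 0 < v ∧ (2 ≤ N ∨ N < 0)
      · have hd := pvInnerDec h
        have h1 : altStep v N = PySem.Int.mod v N * PySem.Int.mod v N +
            altStep (PySem.Int.floordiv v N) N := by
          unfold altStep
          rw [altDigits_eq_cons h]
          simp
        have h2 : heavyInner v N 0 =
            (0 + PySem.Int.mod v N * PySem.Int.mod v N) +
              heavyInner (PySem.Int.floordiv v N) N 0 := by
          rw [heavyInner.eq_def, dif_pos h]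
          exact heavyInner_acc (PySem.Int.floordiv v N).toNat _ le_rfl _ _
        rw [h1, ih _ (by omega) N, h2]
        ring
      · rw [altStep_zero h, heavyInner_of_not _ _ _ h]

lemma altStep_eq (v N : Int) : altStep v N = heavyInner v N 0 :=
  altStep_eq_aux v.toNat v le_rfl N

-- ==== A-side characterisation ====

lemma pvStepOne (N : Int) (hN : 2 ≤ N) : heavyInner 1 N 0 = 1 := by
  have hd : PySem.Int.floordiv 1 N = 0 := by
    rw [PySem.Int.floordiv_eq_ediv_of_pos (by omega)]
    exact Int.ediv_eq_zero_of_lt (by omega) (by omega)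
  have hm : PySem.Int.mod 1 N = 1 := by
    rw [PySem.Int.mod_eq_emod_of_pos (by omega)]
    exact Int.emod_eq_of_lt (by omega) (by omega)
  rw [heavyInner.eq_def, dif_pos ⟨one_pos, Or.inl hN⟩, hd, hm,
    heavyInner_of_not _ _ _ (by omega)]
  ring
-- unfolding equations for the two fuel loops
lemma heavyLoop_succ (N : Int) (f : Nat) (v : List Int) (y : Int) :
    heavyLoop N (f + 1) v y =
      if y ∈ v then false
      else if heavyInner y N 0 = 1 then true
      else heavyLoop N f (v ++ [y]) (heavyInner y N 0) := rfl

lemma floydLoop_succ (N : Int) (f : Nat) (slow fast : Int) :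
    floydLoop N (f + 1) slow fast =
      if slow ≠ fast then floydLoop N f (altStep slow N) (altStep (altStep fast N) N)
      else (slow == 1) := rfl

-- A's loop, run with enough fuel on the orbit of the step function, answers exactly
-- "some later iterate is 1"
lemma heavyLoop_iff (y0 N : Int) (hN : 2 ≤ N) :
    ∀ (fuel m : Nat), (heavyS y0 N).length + 1 ≤ fuel + m →
      ∀ (h1 : ((List.range m).map (altIter N y0)).Nodup)
        (h2 : ∀ v ∈ (List.range m).map (altIter N y0), v ∈ heavyS y0 N)
        (h3 : altIter N y0 m ∈ heavyS y0 N),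
      (∀ t, 0 < t → t ≤ m → altIter N y0 t ≠ 1) →
      (heavyLoop N fuel ((List.range m).map (altIter N y0)) (altIter N y0 m) = true ↔
        ∃ j, m < j ∧ altIter N y0 j = 1) := by
  intro fuel
  induction fuel with
  | zero =>
      intro m hf h1 h2 h3 hprev
      exfalso
      have hlen := pvNodupLenLe _ _ h1 h2
      simp only [List.length_map, List.length_range] at hlen
      omega
  | succ fuel ih =>
      intro m hf h1 h2 h3 hprev
      have hnext : heavyInner (altIter N y0 m) N 0 = altIter N y0 (m + 1) := by
        rw [altIter_succ, altStep_eq]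
      rw [heavyLoop_succ]
      by_cases hmem : altIter N y0 m ∈ (List.range m).map (altIter N y0)
      · rw [if_pos hmem]
        simp only [Bool.false_eq_true, false_iff]
        rintro ⟨j, hj, hj1⟩
        obtain ⟨i, hi, hieq⟩ := List.mem_map.mp hmem
        have hi' : i < m := List.mem_range.mp hi
        set p := m - i with hp
        have hshift := altShift (fun v => altStep v N) y0 i p
          (by show altIter N y0 (i + p) = altIter N y0 i
              rw [show i + p = m from by omega]
              exact hieq.symm)
        have hdm := Nat.div_add_mod (j - i) p
        have hsp : (j - i) % p < p := Nat.mod_lt _ (by omega)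
        have hshift' := hshift ((j - i) / p) ((j - i) % p)
        have hcm : (j - i) / p * p = p * ((j - i) / p) := Nat.mul_comm _ _
        have ej : (j - i) % p + i + (j - i) / p * p = j := by omega
        rw [ej] at hshift'
        have hshift'' : altIter N y0 j = altIter N y0 ((j - i) % p + i) := hshift'
        have ht : altIter N y0 ((j - i) % p + i) = 1 := by
          rw [← hshift'']; exact hj1
        rcases Nat.eq_zero_or_pos ((j - i) % p + i) with h0 | h0
        · -- the repeated index is 0: the start y0 itself equals 1, so step 1 = 1 at index 1
          have hy1 : altIter N y0 0 = 1 := by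
            have h' := ht
            rw [show (j - i) % p + i = 0 from by omega] at h'
            exact h'
          have h11 : altIter N y0 1 = 1 := by
            rw [show (1:Nat) = 0 + 1 from rfl, altIter_succ, altStep_eq, hy1, pvStepOne N hN]
          exact hprev 1 (by omega) (by omega) h11
        · exact hprev _ h0 (by omega) ht
      · rw [if_neg hmem]
        by_cases hone : heavyInner (altIter N y0 m) N 0 = 1
        · rw [if_pos hone]
          constructor
          · intro _
            exact ⟨m + 1, by omega, by rw [← hnext]; exact hone⟩
          · intro _; rfl
        · rw [if_neg hone]
          have hlist : (List.range m).map (altIter N y0) ++ [altIter N y0 m] =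
              (List.range (m + 1)).map (altIter N y0) := by
            rw [List.range_succ, List.map_append]
            simp
          rw [hlist, hnext]
          have hq1 : ((List.range (m + 1)).map (altIter N y0)).Nodup :=
            hlist ▸ pvNodupSnoc h1 hmem
          have hq2 : ∀ v ∈ (List.range (m + 1)).map (altIter N y0), v ∈ heavyS y0 N :=
            hlist ▸ pvMemSnoc h2 h3
          have hq3 : altIter N y0 (m + 1) ∈ heavyS y0 N := hnext ▸ heavyS_closed y0 N _ h3
          rw [ih (m + 1) (by omega) hq1 hq2 hq3
            (by intro t ht0 htm
                rcases Nat.lt_or_ge t (m + 1) with h | h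
                · exact hprev t ht0 (by omega)
                · have : t = m + 1 := by omega
                  subst this
                  rw [← hnext]; exact hone)]
          constructor
          · rintro ⟨j, hj, hj1⟩; exact ⟨j, by omega, hj1⟩
          · rintro ⟨j, hj, hj1⟩
            rcases Nat.lt_or_ge (m + 1) j with h | h
            · exact ⟨j, h, hj1⟩
            · have : j = m + 1 := by omega
              subst this
              exact absurd (hnext ▸ hj1) (by rw [← hnext] at hj1; exact fun _ => hone hj1)

lemma heavyS_len_le (y N : Int) : (heavyS y N).length ≤ (heavyBound y N).toNat + 2 := by
  simp only [heavyS, List.length_cons, PySem.List.length_pyRange_one]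
  have := heavyBound_nonneg y N
  omega

lemma heavy_true_iff (y N : Int) (hN : 2 ≤ N) :
    heavy y N = true ↔ ∃ j, 0 < j ∧ altIter N y j = 1 := by
  have hlen := heavyS_len_le y N
  have h := heavyLoop_iff y N hN ((heavyBound y N).toNat + 3) 0 (by omega) (by simp) (by simp)
    (by rw [mem_heavyS]; exact Or.inl rfl) (by omega)
  simpa [heavy, altIter] using h

-- B's loop, run with enough fuel, returns "the first meeting iterate is 1"
lemma floydLoop_meet_eq (y N : Int) :
    ∀ (fuel m : Nat) (slow fast : Int),
      slow = altIter N y m → fast = altIter N y (2 * m) → 0 < m →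
      (∀ k, 0 < k → k < m → altIter N y k ≠ altIter N y (2 * k)) →
      altMeetIdx y N < fuel + m →
      floydLoop N fuel slow fast = (altIter N y (altMeetIdx y N) == 1) := by
  intro fuel
  induction fuel with
  | zero =>
      intro m slow fast hs hf hm hprev hfu
      exfalso
      have hspec : 0 < altMeetIdx y N ∧
          altIter N y (altMeetIdx y N) = altIter N y (2 * altMeetIdx y N) :=
        Nat.find_spec (altMeet_exists y N)
      exact hprev _ hspec.1 (by omega) hspec.2
  | succ fuel ih =>
      intro m slow fast hs hf hm hprev hfu
      have hspec : 0 < altMeetIdx y N ∧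
          altIter N y (altMeetIdx y N) = altIter N y (2 * altMeetIdx y N) :=
        Nat.find_spec (altMeet_exists y N)
      rw [floydLoop_succ]
      by_cases hne : slow ≠ fast
      · rw [if_pos hne]
        have hgt : m < altMeetIdx y N := by
          by_contra hc
          rcases Nat.lt_or_ge (altMeetIdx y N) m with h | h
          · exact hprev _ hspec.1 h hspec.2
          · obtain rfl : altMeetIdx y N = m := by omega
            exact hne (by rw [hs, hf, hspec.2])
        refine ih (m + 1) (altStep slow N) (altStep (altStep fast N) N) ?_ ?_ (by omega) ?_ (by omega)
        · rw [hs, ← altIter_succ]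
        · rw [show 2 * (m + 1) = 2 * m + 1 + 1 from by omega, altIter_succ, altIter_succ, ← hf]
        · intro k hk hkm
          rcases Nat.lt_or_ge k m with h | h
          · exact hprev k hk h
          · obtain rfl : k = m := by omega
            intro hcon
            exact hne (by rw [hs, hf, hcon])
      · rw [if_neg hne]
        have heq : slow = fast := not_ne_iff.mp hne
        have hmeet : altIter N y m = altIter N y (2 * m) := by
          rw [← hs, ← hf, heq]
        have hle : altMeetIdx y N ≤ m := Nat.find_le ⟨hm, hmeet⟩
        have hge : ¬ altMeetIdx y N < m := fun hlt => hprev _ hspec.1 hlt hspec.2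
        have hidx : altMeetIdx y N = m := by omega
        rw [hidx, ← hs]

lemma altSet_card_le (y N : Int) : (altSet y N).card ≤ (altB y N).toNat + 2 := by
  have h1 : (altSet y N).card ≤
      ((Finset.range ((altB y N + 1).toNat)).image (fun (i : Nat) => (i : Int))).card + 1 :=
    Finset.card_insert_le _ _
  have h2 : ((Finset.range ((altB y N + 1).toNat)).image (fun (i : Nat) => (i : Int))).card ≤
      (altB y N + 1).toNat :=
    le_trans Finset.card_image_le (by rw [Finset.card_range])
  omega

lemma heavy_alt_eq (y N : Int) : heavy_alt y N = (altIter N y (altMeetIdx y N) == 1) := by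
  unfold heavy_alt
  refine floydLoop_meet_eq y N ((altB y N).toNat + 3) 1 _ _ ?_ ?_ Nat.one_pos ?_ ?_
  · rw [show (1:Nat) = 0 + 1 from rfl, altIter_succ]
    simp [altIter]
  · rw [show 2 * 1 = 0 + 1 + 1 from by norm_num, altIter_succ, altIter_succ]
    simp [altIter]
  · intro k hk1 hk2; omega
  · have h1 := altMeetIdx_le_card y N
    have h2 := altSet_card_le y N
    omega

lemma meet_one_iff (y N : Int) (hN : 2 ≤ N) :
    altIter N y (altMeetIdx y N) = 1 ↔ ∃ j, 0 < j ∧ altIter N y j = 1 := by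
  have hspec : 0 < altMeetIdx y N ∧
      altIter N y (altMeetIdx y N) = altIter N y (2 * altMeetIdx y N) :=
    Nat.find_spec (altMeet_exists y N)
  constructor
  · intro h
    exact ⟨altMeetIdx y N, hspec.1, h⟩
  · rintro ⟨j, hj, hj1⟩
    -- past j every iterate is 1, because the step fixes 1 for N ≥ 2
    have hone : ∀ d : Nat, altIter N y (j + d) = 1 := by
      intro d
      induction d with
      | zero => simpa using hj1
      | succ d ih =>
          rw [show j + (d + 1) = (j + d) + 1 from by omega, altIter_succ, ih, altStep_eq,
            pvStepOne N hN]
    set fm := altMeetIdx y N with hfm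
    have hshift := altShift (fun v => altStep v N) y fm fm
      (by show altIter N y (fm + fm) = altIter N y fm
          rw [show fm + fm = 2 * fm from by omega]
          exact hspec.2.symm)
    have h1 : altIter N y (0 + fm + j * fm) = altIter N y (0 + fm) := hshift j 0
    have e1 : (0:Nat) + fm + j * fm = j + (fm + j * fm - j) := by
      have hfm1 : 1 ≤ fm := hspec.1
      have : j ≤ j * fm := Nat.le_mul_of_pos_right j hspec.1
      omega
    rw [e1] at h1
    rw [show (0:Nat) + fm = fm from by omega] at h1
    rw [← h1]
    exact hone _

-- ==== the y ≤ 0 case: both programs collapse to 0 and return false ====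

-- ==== the y ≤ 0 case: both programs collapse to 0 and return false ====

lemma heavy_nonpos (y N : Int) (hy : y ≤ 0) : heavy y N = false := by
  have hz : heavyInner y N 0 = 0 := heavyInner_of_not _ _ _ (by omega)
  have hz0 : heavyInner 0 N 0 = 0 := heavyInner_of_not _ _ _ (by omega)
  set k := (heavyBound y N).toNat with hkdef
  unfold heavy
  rw [show k + 3 = (k + 2) + 1 from by omega]
  rw [heavyLoop_succ, if_neg (List.not_mem_nil), if_neg (by simp [hz]), List.nil_append, hz]
  by_cases hy0 : y = 0
  · rw [show k + 2 = (k + 1) + 1 from by omega, heavyLoop_succ, if_pos (by simp [hy0])]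
  · rw [show k + 2 = (k + 1) + 1 from by omega, heavyLoop_succ,
      if_neg (by simp only [List.mem_singleton]; omega), if_neg (by simp [hz0]), hz0,
      heavyLoop_succ, if_pos (by simp)]
lemma altStep_nonpos (v N : Int) (h : v ≤ 0) : altStep v N = 0 :=
  altStep_zero (by omega)

lemma heavy_alt_nonpos (y N : Int) (hy : y ≤ 0) : heavy_alt y N = false := by
  have h0 : altStep y N = 0 := altStep_nonpos y N hy
  unfold heavy_alt
  rw [h0, altStep_nonpos 0 N le_rfl,
    show (altB y N).toNat + 3 = ((altB y N).toNat + 2) + 1 from by omega,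
    floydLoop_succ, if_neg (by simp)]
  decide

-- ===== VERDICT (by name: the statement is the Claim_ definition above) =====
theorem heavy_spec : Claim_equal_heavy := by
  unfold Claim_equal_heavy Spec_heavy
  intro y N _ hpre
  rcases hpre with hN | hy
  · rw [Bool.eq_iff_iff, heavy_true_iff y N hN, heavy_alt_eq y N]
    rw [beq_iff_eq]
    exact (meet_one_iff y N hN).symm
  · rw [heavy_nonpos y N hy, heavy_alt_nonpos y N hy]
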